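-- pv_equiv track=rewrite | github.com/LeandroVish/att---pc | Lista de Exercícios – Desafio - Dicionários/ex3.py | unique_words
-- ===== SOURCE A (Python) =====
-- data = {
--     'frutas': ['maçã', 'banana', 'laranja'],
--     'vegetais': ['cenoura', 'batata', 'maçã'],
--     'grãos': ['arroz', 'feijão', 'milho', 'banana']
-- }
--
-- def unique_words(data):
--     all_words = {}
--     for key, words in data.items():
--         for word in words:
--             if word not in all_words:
--                 all_words[word] = {key}
--             else:
--                 all_words[word].add(key)
--
--     unique = {key: [] for key in data.keys()}
--     for word, keys in all_words.items():
--         if len(keys) == 1: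
--             unique_key = list(keys)[0]
--             unique[unique_key].append(word)
--
--     return unique
-- ===== SOURCE B (Python) =====
-- def unique_words(data):
--     counts = {}
--     for words in data.values():
--         for w in set(words):
--             counts[w] = counts.get(w, 0) + 1
--     result = {}
--     for key, words in data.items():
--         uniq = []
--         seen = set()
--         for w in words:
--             if counts.get(w, 0) == 1 and w not in seen:
--                 seen.add(w)
--                 uniq.append(w)
--         result[key] = uniq
--     return result
-- ===== Notes on version B (the rewrite author's own statement) =====
-- stated objective: alternative
-- what changed: A builds a word -> set-of-keys dictionary and then scatters unique words back into per-key lists by iterating that dictionary; B instead computes one per-word count of distinct keys containing it and builds each key's output directly by scanning that key's own word list in order with a seen-set dedup.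
import Mathlib
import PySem

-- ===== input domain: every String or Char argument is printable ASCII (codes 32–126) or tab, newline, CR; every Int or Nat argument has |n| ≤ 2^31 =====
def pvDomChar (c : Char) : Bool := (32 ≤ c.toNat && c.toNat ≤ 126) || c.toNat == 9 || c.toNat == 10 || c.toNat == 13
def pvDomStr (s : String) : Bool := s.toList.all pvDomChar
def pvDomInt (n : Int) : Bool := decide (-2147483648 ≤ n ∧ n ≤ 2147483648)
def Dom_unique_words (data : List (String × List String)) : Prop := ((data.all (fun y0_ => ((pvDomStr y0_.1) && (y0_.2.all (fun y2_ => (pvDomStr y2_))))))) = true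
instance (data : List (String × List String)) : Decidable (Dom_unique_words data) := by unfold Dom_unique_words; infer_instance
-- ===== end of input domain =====

-- B rewrites A's "word -> set of keys" map as a single per-word key COUNT plus an in-order
-- filtered scan of each key's own list (alternative decomposition; same asymptotic cost).

-- ===== PORT A =====
-- inner loop body of A's first loop: 'if word not in all_words: all_words[word] = {key} else: all_words[word].add(key)'
def awStep (k : String) (aw : PySem.Dict String (PySem.Set String)) (word : String) :
    PySem.Dict String (PySem.Set String) :=
  if aw.contains word = false then aw.insert word (PySem.Set.ofList [k])
  else aw.modify word PySem.Set.empty (fun s => PySem.Set.add s k)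

-- A's first loop
def allWords (data : List (String × List String)) : PySem.Dict String (PySem.Set String) :=
  data.foldl (fun aw p => p.2.foldl (awStep p.1) aw) PySem.Dict.empty

-- 'unique = {key: [] for key in data.keys()}'
def uInit (data : List (String × List String)) : PySem.Dict String (List String) :=
  data.foldl (fun u p => u.insert p.1 ([] : List String)) PySem.Dict.empty

-- A's second loop body: 'if len(keys) == 1: unique[list(keys)[0]].append(word)'
def uStep (u : PySem.Dict String (List String)) (q : String × PySem.Set String) :
    PySem.Dict String (List String) :=
  if PySem.Set.len q.2 == 1 then u.modify q.2.headI [] (fun l => l ++ [q.1]) else u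

def unique_words (data : List (String × List String)) : List (String × List String) :=
  ((allWords data).items.foldl uStep (uInit data)).items

-- ===== PORT B =====
-- B's first loop: counts[w] = counts.get(w, 0) + 1  for each w in set(words), per key
def countsB (data : List (String × List String)) : PySem.Dict String Int :=
  data.foldl
    (fun c p => (PySem.Set.ofList p.2).foldl (fun c w => c.insert w (c.getD w 0 + 1)) c)
    PySem.Dict.empty

-- B's inner loop body: 'if counts.get(w, 0) == 1 and w not in seen: seen.add(w); uniq.append(w)'
def selStep (counts : PySem.Dict String Int) (st : List String × PySem.Set String) (w : String) :
    List String × PySem.Set String :=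
  if counts.getD w 0 == 1 && !(PySem.Set.contains st.2 w) then
    (st.1 ++ [w], PySem.Set.add st.2 w)
  else st

def unique_words_alt (data : List (String × List String)) : List (String × List String) :=
  let counts := countsB data
  (data.foldl
    (fun r p => r.insert p.1 ((p.2.foldl (selStep counts) ([], PySem.Set.empty)).1))
    PySem.Dict.empty).items

-- ===== PRECONDITION & SPEC =====
-- Pre_ excludes association lists with duplicate keys: they do not represent a Python dict
-- (dict construction merges duplicates), so A's behaviour on them is not defined by the list.
def Pre_unique_words (data : List (String × List String)) : Prop :=
  (data.map Prod.fst).Nodup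
instance (data : List (String × List String)) : Decidable (Pre_unique_words data) := by
  unfold Pre_unique_words; infer_instance

def pvWitness_unique_words : (List (String × List String)) := [("a", ["x", "y"]), ("b", ["x"])]

def Spec_unique_words (data : List (String × List String)) (out : List (String × List String)) : Prop := out = unique_words_alt data
instance (data : List (String × List String)) (out : List (String × List String)) : Decidable (Spec_unique_words data out) := by unfold Spec_unique_words; infer_instance

-- ===== CLAIM (what is proved, stated in full; the proofs are below) =====
def Claim_equal_unique_words : Prop := ∀ (data : List (String × List String)), Dom_unique_words data → Pre_unique_words data → Spec_unique_words data (unique_words data)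

-- ===== LEMMAS AND PROOFS =====

-- keys of the segments of `data` that contain `w`, in order
def wkeys (data : List (String × List String)) (w : String) : List String :=
  (data.filter (fun p => decide (w ∈ p.2))).map Prod.fst

-- the key-set A accumulates for word w
def ksOf (data : List (String × List String)) (w : String) : PySem.Set String :=
  data.foldl (fun s p => if w ∈ p.2 then PySem.Set.add s p.1 else s) PySem.Set.empty

theorem set_contains_iff {s : PySem.Set String} {x : String} :
    PySem.Set.contains s x = true ↔ x ∈ s := by
  simp [PySem.Set.contains]

theorem set_add_of_mem (s : PySem.Set String) {x : String} (h : x ∈ s) :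
    PySem.Set.add s x = s := by
  simp [PySem.Set.add, PySem.Set.contains, h]

theorem set_add_of_not_mem (s : PySem.Set String) {x : String} (h : x ∉ s) :
    PySem.Set.add s x = s ++ [x] := by
  simp [PySem.Set.add, PySem.Set.contains, h]

theorem getD_awStep (k : String) (aw : PySem.Dict String (PySem.Set String)) (u w : String) :
    (awStep k aw u).getD w PySem.Set.empty =
      if w = u then PySem.Set.add (aw.getD w PySem.Set.empty) k
      else aw.getD w PySem.Set.empty := by
  unfold awStep
  cases h : aw.contains u with
  | false =>
    rw [if_pos rfl, PySem.Dict.getD_insert]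
    by_cases hw : w = u
    · subst hw
      rw [if_pos rfl, if_pos rfl, PySem.Dict.getD_of_not_contains aw _ h]
      rfl
    · rw [if_neg hw, if_neg hw]
  | true =>
    rw [if_neg (by simp), PySem.Dict.getD_modify]
    by_cases hw : w = u <;> simp [hw]

theorem getD_foldl_awStep (ws : List String) (k : String) :
    ∀ (aw : PySem.Dict String (PySem.Set String)) (w : String),
      ((ws.foldl (awStep k) aw).getD w PySem.Set.empty) =
        if w ∈ ws then PySem.Set.add (aw.getD w PySem.Set.empty) k
        else aw.getD w PySem.Set.empty := by
  induction ws with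
  | nil => simp
  | cons u ws ih =>
    intro aw w
    simp only [List.foldl_cons]
    rw [ih, getD_awStep]
    by_cases h1 : w ∈ ws <;> by_cases h2 : w = u <;>
      simp [h1, h2, List.mem_cons]

theorem getD_allWords_gen (data : List (String × List String)) :
    ∀ (aw : PySem.Dict String (PySem.Set String)) (w : String),
      ((data.foldl (fun aw p => p.2.foldl (awStep p.1) aw) aw).getD w PySem.Set.empty) =
        data.foldl (fun s p => if w ∈ p.2 then PySem.Set.add s p.1 else s)
          (aw.getD w PySem.Set.empty) := by
  induction data with
  | nil => intro aw w; rfl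
  | cons p rest ih =>
    intro aw w
    simp only [List.foldl_cons]
    rw [ih, getD_foldl_awStep]

theorem getD_allWords (data : List (String × List String)) (w : String) :
    (allWords data).getD w PySem.Set.empty = ksOf data w := by
  unfold allWords ksOf
  rw [getD_allWords_gen]
  simp [PySem.Dict.getD_empty]

theorem keys_awStep (k : String) (aw : PySem.Dict String (PySem.Set String)) (u : String) :
    (awStep k aw u).keys = PySem.Set.add aw.keys u := by
  unfold awStep
  cases h : aw.contains u with
  | false =>
    rw [if_pos rfl, PySem.Dict.keys_insert_of_not_contains aw _ h, set_add_of_not_mem]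
    intro hmem
    exact absurd ((PySem.Dict.contains_iff_mem_keys aw u).mpr hmem) (by simp [h])
  | true =>
    rw [if_neg (by simp), PySem.Dict.keys_modify, PySem.Dict.keys_insert_of_contains aw _ h,
      set_add_of_mem _ ((PySem.Dict.contains_iff_mem_keys aw u).mp h)]

theorem keys_foldl_awStep (ws : List String) (k : String) :
    ∀ (aw : PySem.Dict String (PySem.Set String)),
      (ws.foldl (awStep k) aw).keys = PySem.Set.update aw.keys ws := by
  induction ws with
  | nil => intro aw; rfl
  | cons u ws ih =>
    intro aw
    simp only [List.foldl_cons, PySem.Set.update] at *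
    rw [ih, keys_awStep]

theorem keys_allWords (data : List (String × List String)) :
    (allWords data).keys = PySem.Set.ofList (data.flatMap (fun p => p.2)) := by
  unfold allWords
  rw [PySem.Set.ofList_eq_foldl, List.foldl_flatMap]
  have gen : ∀ (d : List (String × List String)) (aw : PySem.Dict String (PySem.Set String)),
      (d.foldl (fun aw p => p.2.foldl (awStep p.1) aw) aw).keys =
        d.foldl (fun acc p => p.2.foldl PySem.Set.add acc) aw.keys := by
    intro d
    induction d with
    | nil => intro aw; rfl
    | cons p rest ih =>
      intro aw
      simp only [List.foldl_cons]
      rw [ih, keys_foldl_awStep]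
      rfl
  rw [gen]
  simp [PySem.Dict.keys_empty]

theorem items_allWords (data : List (String × List String)) :
    (allWords data).items =
      (PySem.Set.ofList (data.flatMap (fun p => p.2)) : List String).map
        (fun w => (w, ksOf data w)) := by
  have hnd : (allWords data).keys.Nodup := by
    rw [keys_allWords]; exact PySem.Set.nodup_ofList _
  rw [PySem.Dict.items_eq_map_keys _ hnd PySem.Set.empty, keys_allWords]
  exact List.map_congr_left (fun w _ => by rw [getD_allWords])

theorem getD_foldl_uStep (l : List (String × PySem.Set String)) :
    ∀ (u : PySem.Dict String (List String)) (k : String),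
      ((l.foldl uStep u).getD k []) =
        u.getD k [] ++
          (l.filter (fun q => PySem.Set.len q.2 == 1 && q.2.headI == k)).map (fun q => q.1) := by
  induction l with
  | nil => simp
  | cons q l ih =>
    intro u k
    simp only [List.foldl_cons, List.filter_cons]
    rw [ih]
    unfold uStep
    by_cases hlen : (PySem.Set.len q.2 == 1) = true
    · rw [if_pos hlen, PySem.Dict.getD_modify]
      have hl : List.length q.2 = 1 := by simpa [PySem.Set.len] using hlen
      by_cases hk : k = q.2.headI
      · simp [hl, hk, List.append_assoc]
      · have hne : ¬ List.headI q.2 = k := fun h => hk h.symm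
        simp [hl, hne, hk]
    · rw [if_neg hlen]
      have hl : ¬ List.length q.2 = 1 := by simpa [PySem.Set.len] using hlen
      simp [hl]

theorem keys_foldl_uStep (l : List (String × PySem.Set String)) :
    ∀ (u : PySem.Dict String (List String)),
      (∀ q ∈ l, (PySem.Set.len q.2 == 1) = true → q.2.headI ∈ u.keys) →
      (l.foldl uStep u).keys = u.keys := by
  induction l with
  | nil => intro u _; rfl
  | cons q l ih =>
    intro u hq
    simp only [List.foldl_cons]
    have hkeys : (uStep u q).keys = u.keys := by
      unfold uStep
      by_cases hlen : (PySem.Set.len q.2 == 1) = true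
      · rw [if_pos hlen]
        have hc : u.contains q.2.headI = true :=
          (PySem.Dict.contains_iff_mem_keys u _).mpr (hq q (by simp) hlen)
        rw [PySem.Dict.keys_modify, PySem.Dict.keys_insert_of_contains _ _ hc]
      · rw [if_neg hlen]
    rw [ih _ (fun r hr hlr => by rw [hkeys]; exact hq r (by simp [hr]) hlr), hkeys]

theorem getD_uInit_gen (data : List (String × List String)) :
    ∀ (u : PySem.Dict String (List String)) (k : String), u.getD k ([] : List String) = [] →
      ((data.foldl (fun u p => u.insert p.1 ([] : List String)) u)).getD k [] = [] := by
  induction data with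
  | nil => intro u k h; simpa using h
  | cons p rest ih =>
    intro u k h
    simp only [List.foldl_cons]
    refine ih _ _ ?_
    rw [PySem.Dict.getD_insert]
    split_ifs <;> [rfl; exact h]

theorem items_uInit (data : List (String × List String)) (h : (data.map Prod.fst).Nodup) :
    (uInit data).items = data.map (fun p => (p.1, ([] : List String))) := by
  have := PySem.Dict.items_foldl_insert_fresh data Prod.fst (fun _ => ([] : List String))
    PySem.Dict.empty (fun a _ => PySem.Dict.contains_empty a.1) h
  unfold uInit
  simpa using this

theorem keys_uInit (data : List (String × List String)) (h : (data.map Prod.fst).Nodup) :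
    (uInit data).keys = data.map Prod.fst := by
  simp only [PySem.Dict.keys, items_uInit data h, List.map_map]
  rfl

theorem getD_countsB_gen (data : List (String × List String)) (w : String) :
    ∀ (c : PySem.Dict String Int),
      ((data.foldl
          (fun c p => (PySem.Set.ofList p.2).foldl (fun c w => c.insert w (c.getD w 0 + 1)) c)
          c).getD w 0) =
        c.getD w 0 + (data.countP (fun p => decide (w ∈ p.2)) : Int) := by
  induction data with
  | nil => intro c; simp
  | cons p rest ih =>
    intro c
    simp only [List.foldl_cons, List.countP_cons]
    rw [ih, PySem.Dict.getD_foldl_insert_add_one]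
    have hcnt : List.count w (PySem.Set.ofList p.2) = if w ∈ p.2 then 1 else 0 := by
      by_cases hm : w ∈ p.2
      · rw [if_pos hm]
        exact List.count_eq_one_of_mem (PySem.Set.nodup_ofList p.2)
          ((PySem.Set.mem_ofList p.2 w).mpr hm)
      · rw [if_neg hm]
        exact List.count_eq_zero.mpr (fun hc => hm ((PySem.Set.mem_ofList p.2 w).mp hc))
    rw [hcnt]
    by_cases hm : w ∈ p.2
    · simp [hm]
      ring
    · simp [hm]

theorem getD_countsB (data : List (String × List String)) (w : String) :
    (countsB data).getD w 0 = (data.countP (fun p => decide (w ∈ p.2)) : Int) := by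
  unfold countsB
  rw [getD_countsB_gen]
  simp [PySem.Dict.getD_empty]

theorem fst_foldl_selStep (counts : PySem.Dict String Int) (ws : List String) :
    ∀ (a : List String),
      ((ws.foldl (selStep counts) (a, a)).1) =
        (ws.filter (fun w => counts.getD w 0 == 1)).foldl PySem.Set.add a := by
  induction ws with
  | nil => intro a; rfl
  | cons w ws ih =>
    intro a
    simp only [List.foldl_cons, List.filter_cons]
    by_cases hq : (counts.getD w 0 == 1) = true
    · by_cases hm : w ∈ a
      · have hc : PySem.Set.contains a w = true := set_contains_iff.mpr hm
        have hstep : selStep counts (a, a) w = (a, a) := by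
          unfold selStep; simp [hq, hm]
        rw [hstep, ih, if_pos hq]
        simp only [List.foldl_cons, set_add_of_mem a hm]
      · have hc : PySem.Set.contains a w = false := by
          simpa [set_contains_iff] using hm
        have hadd : PySem.Set.add a w = a ++ [w] := set_add_of_not_mem a hm
        have hstep : selStep counts (a, a) w = (a ++ [w], a ++ [w]) := by
          unfold selStep; simp [hq, hm]
        rw [hstep, ih, if_pos hq]
        simp only [List.foldl_cons, hadd]
    · have hstep : selStep counts (a, a) w = (a, a) := by
        unfold selStep; simp [hq]
      rw [hstep, ih, if_neg hq]

theorem filter_add (P : String → Bool) (s : PySem.Set String) (x : String) :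
    List.filter P (PySem.Set.add s x) =
      if P x then PySem.Set.add (List.filter P s) x else List.filter P s := by
  by_cases hm : x ∈ s
  · rw [set_add_of_mem s hm]
    by_cases hP : P x = true
    · rw [if_pos hP, set_add_of_mem]
      exact List.mem_filter.mpr ⟨hm, hP⟩
    · rw [if_neg hP]
  · rw [set_add_of_not_mem s hm, List.filter_append]
    by_cases hP : P x = true
    · rw [if_pos hP, set_add_of_not_mem]
      · simp [hP]
      · exact fun hc => hm (List.mem_filter.mp hc).1
    · simp [hP]

theorem filter_foldl_add (P : String → Bool) (xs : List String) :
    ∀ (s : List String),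
      List.filter P (xs.foldl PySem.Set.add s) =
        (xs.filter P).foldl PySem.Set.add (List.filter P s) := by
  induction xs with
  | nil => intro s; rfl
  | cons x xs ih =>
    intro s
    simp only [List.foldl_cons, List.filter_cons]
    rw [ih, filter_add]
    by_cases hP : P x = true <;> simp [hP]

theorem ksOf_eq_gen (w : String) :
    ∀ (rest : List (String × List String)) (s : PySem.Set String),
      (∀ q ∈ rest, q.1 ∉ s) → (rest.map Prod.fst).Nodup →
      rest.foldl (fun s p => if w ∈ p.2 then PySem.Set.add s p.1 else s) s = s ++ wkeys rest w := by
  intro rest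
  induction rest with
  | nil => intro s _ _; simp [wkeys]
  | cons q rest ih =>
    intro s hfresh hnd
    simp only [List.map_cons, List.nodup_cons] at hnd
    simp only [List.foldl_cons]
    by_cases hm : w ∈ q.2
    · rw [if_pos hm, set_add_of_not_mem s (hfresh q (by simp))]
      rw [ih _ ?_ hnd.2]
      · simp only [wkeys, List.filter_cons, hm, decide_true]
        simp [List.append_assoc]
      · intro r hr hmem
        rcases List.mem_append.mp hmem with h1 | h1
        · exact hfresh r (by simp [hr]) h1
        · simp only [List.mem_singleton] at h1
          exact hnd.1 (h1 ▸ List.mem_map.mpr ⟨r, hr, rfl⟩)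
    · rw [if_neg hm, ih _ (fun r hr => hfresh r (by simp [hr])) hnd.2]
      simp [wkeys, hm]

theorem ksOf_eq (data : List (String × List String)) (hnd : (data.map Prod.fst).Nodup)
    (w : String) : ksOf data w = wkeys data w := by
  unfold ksOf
  simpa using ksOf_eq_gen w data PySem.Set.empty (by intro q _ h; simp at h) hnd

theorem mem_wkeys_of (data : List (String × List String)) {q : String × List String} {w : String}
    (hq : q ∈ data) (hw : w ∈ q.2) : q.1 ∈ wkeys data w := by
  simp only [wkeys, List.mem_map]
  exact ⟨q, List.mem_filter.mpr ⟨hq, by simpa using hw⟩, rfl⟩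

theorem wkeys_subset (data : List (String × List String)) {x w : String}
    (h : x ∈ wkeys data w) : x ∈ data.map Prod.fst := by
  simp only [wkeys, List.mem_map] at h
  rcases h with ⟨q, hq, rfl⟩
  exact List.mem_map.mpr ⟨q, (List.mem_filter.mp hq).1, rfl⟩

theorem lenheadI (l : List String) (k : String) :
    ((PySem.Set.len l == 1) && (l.headI == k)) = decide (l = [k]) := by
  rcases l with _ | ⟨a, _ | ⟨b, t⟩⟩
  · simp [PySem.Set.len]
  · simp only [PySem.Set.len, List.length_cons, List.length_nil, List.headI]
    by_cases h : a = k <;> simp [h]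
  · have h1 : (PySem.Set.len (a :: b :: t) == 1) = false := by
      simp [PySem.Set.len]
      omega
    have h2 : (decide ((a :: b :: t) = [k])) = false := by simp
    rw [h1, h2, Bool.false_and]

theorem per_key (data : List (String × List String)) (hnd : (data.map Prod.fst).Nodup)
    (p : String × List String) (hp : p ∈ data) :
    ((allWords data).items.filter
        (fun q => PySem.Set.len q.2 == 1 && q.2.headI == p.1)).map (fun q => q.1) =
      (p.2.foldl (selStep (countsB data)) ([], PySem.Set.empty)).1 := by
  obtain ⟨s, t, rfl⟩ := List.append_of_mem hp
  have hB := fst_foldl_selStep (countsB (s ++ p :: t)) p.2 ([] : List String)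
  rw [show (([], PySem.Set.empty) : List String × PySem.Set String) =
      (([] : List String), ([] : List String)) from rfl, hB]
  rw [items_allWords, List.filter_map, List.map_map]
  have hid : ((fun q => q.1) ∘ fun w => (w, ksOf (s ++ p :: t) w)) = fun w => w := rfl
  rw [hid, List.map_id']
  rw [List.filter_congr (l := (PySem.Set.ofList ((s ++ p :: t).flatMap (fun p => p.2)) : List String))
      (q := fun w => decide (wkeys (s ++ p :: t) w = [p.1]))
      (fun w _ => by rw [Function.comp_apply, ksOf_eq _ hnd, lenheadI])]
  rw [PySem.Set.ofList_eq_foldl, filter_foldl_add, List.filter_nil]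
  congr 1
  rw [List.flatMap_append, List.flatMap_cons, List.filter_append, List.filter_append]
  have hndk := hnd
  rw [List.map_append, List.map_cons] at hndk
  have hps : p.1 ∉ s.map Prod.fst := by
    intro hmem
    exact (List.disjoint_of_nodup_append hndk) hmem (by simp)
  have hpt : p.1 ∉ t.map Prod.fst := by
    have := (List.nodup_append.mp hndk).2.1
    simp only [List.nodup_cons] at this
    exact this.1
  have h1 : (s.flatMap (fun p => p.2)).filter
      (fun w => decide (wkeys (s ++ p :: t) w = [p.1])) = [] := by
    rw [List.filter_eq_nil_iff]
    intro w hw hP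
    rcases List.mem_flatMap.mp hw with ⟨q, hq, hwq⟩
    have hqk : q.1 ∈ wkeys (s ++ p :: t) w :=
      mem_wkeys_of _ (List.mem_append.mpr (Or.inl hq)) hwq
    rw [of_decide_eq_true hP] at hqk
    simp only [List.mem_singleton] at hqk
    exact hps (hqk ▸ List.mem_map.mpr ⟨q, hq, rfl⟩)
  have h3 : (t.flatMap (fun p => p.2)).filter
      (fun w => decide (wkeys (s ++ p :: t) w = [p.1])) = [] := by
    rw [List.filter_eq_nil_iff]
    intro w hw hP
    rcases List.mem_flatMap.mp hw with ⟨q, hq, hwq⟩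
    have hqk : q.1 ∈ wkeys (s ++ p :: t) w :=
      mem_wkeys_of _ (List.mem_append.mpr (Or.inr (by simp [hq]))) hwq
    rw [of_decide_eq_true hP] at hqk
    simp only [List.mem_singleton] at hqk
    exact hpt (hqk ▸ List.mem_map.mpr ⟨q, hq, rfl⟩)
  rw [h1, h3, List.nil_append, List.append_nil]
  apply List.filter_congr
  intro w hw
  have hsplit : wkeys (s ++ p :: t) w = wkeys s w ++ p.1 :: wkeys t w := by
    simp [wkeys, List.filter_append, hw]
  rw [getD_countsB]
  have hlen : (List.countP (fun q => decide (w ∈ q.2)) (s ++ p :: t) : Int) =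
      ((wkeys (s ++ p :: t) w).length : Int) := by
    simp [wkeys, List.countP_eq_length_filter]
  rw [Bool.eq_iff_iff]
  constructor
  · intro hP
    have hc1 : ((List.countP (fun q => decide (w ∈ q.2)) (s ++ p :: t)) : Int) = 1 := by
      rw [hlen, of_decide_eq_true hP]
      simp
    simpa using hc1
  · intro hQ
    have : ((wkeys (s ++ p :: t) w).length : Int) = 1 := by
      rw [← hlen]
      simpa using hQ
    rw [hsplit] at this ⊢
    simp only [List.length_append, List.length_cons] at this
    have hs0 : wkeys s w = [] := List.length_eq_zero_iff.mp (by omega)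
    have ht0 : wkeys t w = [] := List.length_eq_zero_iff.mp (by omega)
    simp [hs0, ht0]

-- ===== VERDICT (by name: the statement is the Claim_ definition above) =====
theorem unique_words_spec : Claim_equal_unique_words := by
  intro data _ hpre
  unfold Spec_unique_words
  unfold unique_words unique_words_alt
  have hkeysInit : (uInit data).keys = data.map Prod.fst := keys_uInit data hpre
  have hhyp : ∀ q ∈ (allWords data).items,
      (PySem.Set.len q.2 == 1) = true → q.2.headI ∈ (uInit data).keys := by
    intro q hq hlen
    rw [hkeysInit]
    rw [items_allWords] at hq
    rcases List.mem_map.mp hq with ⟨w, hw, rfl⟩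
    show (ksOf data w).headI ∈ data.map Prod.fst
    have hne : (ksOf data w) ≠ [] := by
      intro h
      rw [show (w, ksOf data w).2 = ksOf data w from rfl, h] at hlen
      simp [PySem.Set.len] at hlen
    have hmem : (ksOf data w).headI ∈ ksOf data w := by
      cases hks : ksOf data w with
      | nil => exact absurd hks hne
      | cons a r => simp
    rw [ksOf_eq data hpre] at hmem ⊢
    exact wkeys_subset data hmem
  have hkeysFinal : ((allWords data).items.foldl uStep (uInit data)).keys = data.map Prod.fst := by
    rw [keys_foldl_uStep _ _ hhyp, hkeysInit]
  have hndk : ((allWords data).items.foldl uStep (uInit data)).keys.Nodup := by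
    rw [hkeysFinal]; exact hpre
  rw [PySem.Dict.items_eq_map_keys _ hndk ([] : List String), hkeysFinal]
  rw [PySem.Dict.items_foldl_insert_fresh data Prod.fst _ PySem.Dict.empty
    (fun a _ => PySem.Dict.contains_empty a.1) hpre]
  simp only [List.map_map]
  have hempty : (PySem.Dict.empty : PySem.Dict String (List String)).items = [] := rfl
  rw [hempty, List.nil_append]
  apply List.map_congr_left
  intro p hp
  simp only [Function.comp_apply]
  refine Prod.ext rfl ?_
  show (((allWords data).items.foldl uStep (uInit data)).getD p.1 []) = _
  rw [getD_foldl_uStep]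
  have hinit : (uInit data).getD p.1 [] = [] := by
    unfold uInit
    exact getD_uInit_gen data PySem.Dict.empty p.1 (by simp [PySem.Dict.getD_empty])
  rw [hinit, List.nil_append]
  exact per_key data hpre p hp
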